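-- pv_equiv track=rewrite | github.com/leeminHong1990/WenZhouMJ | scripts/common/utility.py | checkIsPongPongWin
-- ===== SOURCE A (Python) =====
-- def getTile2NumDict(tiles):
-- 	tile2NumDict = {}
-- 	for t in tiles:
-- 		if t not in tile2NumDict:
-- 			tile2NumDict[t] = 1
-- 		else:
-- 			tile2NumDict[t] += 1
-- 	return tile2NumDict
--
-- def checkIsPongPongWin(handTilesButKing, uptiles, kingTilesNum):
-- 	for meld in uptiles:
-- 		if (len(meld) != 3 and len(meld) != 4) or meld[0] != meld[-1]:
-- 			return False
-- 	tiles = handTilesButKing[:]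
-- 	tile2NumDict = getTile2NumDict(tiles)
-- 	isDelete = False
-- 	for t in tile2NumDict:
-- 		if tile2NumDict[t] ==2:
-- 			del tile2NumDict[t]
-- 			isDelete = True
-- 			break
-- 	else:
-- 		for t in tile2NumDict:
-- 			if tile2NumDict[t] == 1:
-- 				del tile2NumDict[t]
-- 				kingTilesNum -= 1
-- 				isDelete = True
-- 				break
-- 		else:
-- 			for t in tile2NumDict:
-- 				if tile2NumDict[t] == 4:
-- 					del tile2NumDict[t]
-- 					kingTilesNum -= 1
-- 					isDelete = True
-- 					break
-- 			else:
-- 				for t in tile2NumDict: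
-- 					if tile2NumDict[t] == 3:
-- 						tile2NumDict[t] = 1
-- 						isDelete = True
-- 						break
-- 	for t in tile2NumDict:
-- 		needNum = abs(3-tile2NumDict[t])
-- 		kingTilesNum -= needNum
-- 	if not isDelete or kingTilesNum < 0:
-- 		return False
-- 	return True
-- ===== SOURCE B (Python) =====
-- def checkIsPongPongWin(handTilesButKing, uptiles, kingTilesNum):
--     if not all((len(m) == 3 or len(m) == 4) and m[0] == m[-1] for m in uptiles):
--         return False
--     counts = {}
--     for t in handTilesButKing:
--         counts[t] = counts.get(t, 0) + 1
--     vals = list(counts.values())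
--     S = sum(abs(3 - c) for c in vals)
--     if 2 in vals or 1 in vals:
--         need = S - 1
--     elif 4 in vals:
--         need = S
--     elif 3 in vals:
--         need = S + 2
--     else:
--         return False
--     return kingTilesNum - need >= 0
-- ===== Notes on version B (the rewrite author's own statement) =====
-- stated objective: simpler
-- what changed: B replaces A's four mutate-the-dict search loops (delete a pair / a single / a quad, or rewrite a triplet) plus a final king-subtraction loop by a closed-form king-need formula: one sum S of |3-count| over the count multiset and a single branch on which counts occur, with no dict mutation at all.
import Mathlib
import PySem

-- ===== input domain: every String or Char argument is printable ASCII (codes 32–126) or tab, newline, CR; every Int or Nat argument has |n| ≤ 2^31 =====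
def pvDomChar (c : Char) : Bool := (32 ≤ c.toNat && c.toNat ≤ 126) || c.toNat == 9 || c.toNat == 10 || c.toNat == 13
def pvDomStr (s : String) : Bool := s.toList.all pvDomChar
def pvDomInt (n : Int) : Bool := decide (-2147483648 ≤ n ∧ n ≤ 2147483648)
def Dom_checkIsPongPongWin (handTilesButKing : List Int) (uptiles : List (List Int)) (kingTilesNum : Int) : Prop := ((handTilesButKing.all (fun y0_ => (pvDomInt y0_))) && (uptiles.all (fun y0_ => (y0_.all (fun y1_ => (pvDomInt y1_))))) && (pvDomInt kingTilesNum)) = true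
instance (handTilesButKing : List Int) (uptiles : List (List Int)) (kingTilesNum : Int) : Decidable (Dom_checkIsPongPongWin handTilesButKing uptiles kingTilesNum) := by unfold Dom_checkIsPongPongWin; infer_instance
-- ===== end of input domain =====

-- B replaces A's four mutate-the-dict search loops and final subtraction loop by a closed-form
-- need = f(S, which counts occur) formula over the count multiset (objective: simpler).


-- ===== PORT A =====
def getTile2NumDict (tiles : List Int) : PySem.Dict Int Int :=
  tiles.foldl (fun d t =>
    if !d.contains t then d.insert t 1 else d.insert t (d.getD t 0 + 1))
    PySem.Dict.empty

-- the 'for meld in uptiles: … return False' validation loop, early return as recursion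
def pvCheckMelds : List (List Int) → Bool
  | [] => true
  | m :: rest =>
    if ((!(m.length == 3)) && (!(m.length == 4)))
        || !(PySem.List.pyGet? m 0 == PySem.List.pyGet? m (-1)) then false
    else pvCheckMelds rest

-- 'for t in tile2NumDict: if tile2NumDict[t] == v: … break' — first key (insertion order) with value v
def pvFindVal (d : PySem.Dict Int Int) (v : Int) : Option Int :=
  d.keys.find? (fun t => d.getD t 0 == v)

-- final loop 'for t in tile2NumDict: kingTilesNum -= abs(3 - tile2NumDict[t])' + the final test
def pvFinish (d : PySem.Dict Int Int) (kingTilesNum : Int) (isDelete : Bool) : Bool :=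
  let k := d.values.foldl (fun k c => k - |3 - c|) kingTilesNum
  if !isDelete || k < 0 then false else true

def checkIsPongPongWin (handTilesButKing : List Int) (uptiles : List (List Int)) (kingTilesNum : Int) : Bool :=
  if !pvCheckMelds uptiles then false
  else
    let d := getTile2NumDict handTilesButKing
    match pvFindVal d 2 with
    | some t => pvFinish (d.erase t) kingTilesNum true
    | none =>
      match pvFindVal d 1 with
      | some t => pvFinish (d.erase t) (kingTilesNum - 1) true
      | none =>
        match pvFindVal d 4 with
        | some t => pvFinish (d.erase t) (kingTilesNum - 1) true
        | none =>
          match pvFindVal d 3 with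
          | some t => pvFinish (d.insert t 1) kingTilesNum true
          | none => pvFinish d kingTilesNum false

-- ===== PORT B =====
def checkIsPongPongWin_alt (handTilesButKing : List Int) (uptiles : List (List Int)) (kingTilesNum : Int) : Bool :=
  if !(uptiles.all (fun m =>
        (m.length == 3 || m.length == 4)
          && (PySem.List.pyGet? m 0 == PySem.List.pyGet? m (-1)))) then false
  else
    let counts := handTilesButKing.foldl (fun d t => d.insert t (d.getD t 0 + 1)) PySem.Dict.empty
    let vals := counts.values
    let S := (vals.map (fun c => |3 - c|)).sum
    if vals.contains 2 || vals.contains 1 then decide (kingTilesNum - (S - 1) ≥ 0)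
    else if vals.contains 4 then decide (kingTilesNum - S ≥ 0)
    else if vals.contains 3 then decide (kingTilesNum - (S + 2) ≥ 0)
    else false

-- ===== PRECONDITION & SPEC =====
def Spec_checkIsPongPongWin (handTilesButKing : List Int) (uptiles : List (List Int)) (kingTilesNum : Int) (out : Bool) : Prop := out = checkIsPongPongWin_alt handTilesButKing uptiles kingTilesNum
instance (handTilesButKing : List Int) (uptiles : List (List Int)) (kingTilesNum : Int) (out : Bool) : Decidable (Spec_checkIsPongPongWin handTilesButKing uptiles kingTilesNum out) := by unfold Spec_checkIsPongPongWin; infer_instance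

-- ===== CLAIM (what is proved, stated in full; the proofs are below) =====
def Claim_equal_checkIsPongPongWin : Prop := ∀ (handTilesButKing : List Int) (uptiles : List (List Int)) (kingTilesNum : Int), Dom_checkIsPongPongWin handTilesButKing uptiles kingTilesNum → Spec_checkIsPongPongWin handTilesButKing uptiles kingTilesNum (checkIsPongPongWin handTilesButKing uptiles kingTilesNum)

-- ===== LEMMAS AND PROOFS =====

theorem pvCheckMelds_eq_all : ∀ (l : List (List Int)),
    pvCheckMelds l = l.all (fun m =>
      (m.length == 3 || m.length == 4)
        && (PySem.List.pyGet? m 0 == PySem.List.pyGet? m (-1)))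
  | [] => rfl
  | m :: rest => by
    have hbool : ∀ x y z : Bool, ((!x && !y) || !z) = !((x || y) && z) := by decide
    simp only [pvCheckMelds, List.all_cons, hbool]
    rcases hpm : ((m.length == 3 || m.length == 4)
        && (PySem.List.pyGet? m 0 == PySem.List.pyGet? m (-1))) with _ | _ <;>
      simp [pvCheckMelds_eq_all rest]

theorem getTile2NumDict_eq_counter (tiles : List Int) :
    getTile2NumDict tiles
      = tiles.foldl (fun d t => d.insert t (d.getD t 0 + 1)) PySem.Dict.empty := by
  unfold getTile2NumDict
  suffices h : ∀ (l : List Int) (d : PySem.Dict Int Int),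
      l.foldl (fun d t => if !d.contains t then d.insert t 1 else d.insert t (d.getD t 0 + 1)) d
        = l.foldl (fun d t => d.insert t (d.getD t 0 + 1)) d from h tiles _
  intro l
  induction l with
  | nil => intro d; rfl
  | cons t rest ih =>
    intro d
    simp only [List.foldl_cons]
    have hstep : (if !d.contains t then d.insert t 1 else d.insert t (d.getD t 0 + 1))
        = d.insert t (d.getD t 0 + 1) := by
      rcases hc : d.contains t with _ | _
      · rw [PySem.Dict.getD_of_not_contains d 0 hc]; simp
      · simp
    rw [hstep]; exact ih _

-- the king-subtraction loop is 'start minus the sum'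
theorem foldl_sub_abs : ∀ (vs : List Int) (k : Int),
    vs.foldl (fun k c => k - |3 - c|) k = k - (vs.map (fun c => |3 - c|)).sum
  | [], k => by simp
  | c :: rest, k => by
    rw [List.foldl_cons, foldl_sub_abs rest, List.map_cons, List.sum_cons]
    ring

theorem pvFinish_true (d : PySem.Dict Int Int) (k : Int) :
    pvFinish d k true = decide (k - (d.values.map (fun c => |3 - c|)).sum ≥ 0) := by
  simp only [pvFinish, foldl_sub_abs, Bool.not_true, Bool.false_or]
  split_ifs with h
  · simp only [decide_eq_true_eq] at h
    rw [eq_comm, decide_eq_false_iff_not]; omega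
  · simp only [decide_eq_true_eq] at h
    rw [eq_comm, decide_eq_true_eq]; omega

theorem pvFinish_false (d : PySem.Dict Int Int) (k : Int) :
    pvFinish d k false = false := by
  simp [pvFinish]

-- removing the (unique) pair with key t removes exactly its contribution from the sum
theorem sum_filter_erase : ∀ (l : List (Int × Int)) (t v : Int),
    (l.map Prod.fst).Nodup → (t, v) ∈ l →
    ((l.filter (fun p => !(p.1 == t))).map (fun p => |3 - p.2|)).sum
      = (l.map (fun p => |3 - p.2|)).sum - |3 - v|
  | [], t, v, _, hm => by simp at hm
  | (a, b) :: rest, t, v, hnd, hm => by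
    simp only [List.map_cons, List.nodup_cons] at hnd
    by_cases hat : a = t
    · have hvb : v = b := by
        rcases List.mem_cons.mp hm with heq | hmem
        · cases heq; rfl
        · exact absurd (List.mem_map.mpr ⟨(t, v), hmem, rfl⟩) (hat ▸ hnd.1)
      have hrest : rest.filter (fun p => !(p.1 == t)) = rest := by
        apply List.filter_eq_self.mpr
        intro p hp
        simp only [Bool.not_eq_eq_eq_not, Bool.not_true, beq_eq_false_iff_ne, ne_eq]
        intro hpt
        exact (hat ▸ hnd.1) (List.mem_map.mpr ⟨p, hp, hpt⟩)
      have hc : ((a, b).1 == t) = true := by simp [hat]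
      rw [List.filter_cons, hc]
      rw [if_neg (by simp)]
      rw [hrest, hvb, List.map_cons, List.sum_cons]
      ring
    · have hmem : (t, v) ∈ rest := by
        rcases List.mem_cons.mp hm with heq | hmem
        · cases heq; exact absurd rfl hat
        · exact hmem
      have hc : ((a, b).1 == t) = false := beq_eq_false_iff_ne.mpr hat
      rw [List.filter_cons, hc]
      rw [if_pos (by simp)]
      rw [List.map_cons, List.map_cons, List.sum_cons, List.sum_cons,
        sum_filter_erase rest t v hnd.2 hmem]
      ring

-- overwriting the (unique) pair with key t swaps its contribution in the sum
theorem sum_map_overwrite : ∀ (l : List (Int × Int)) (t v w : Int),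
    (l.map Prod.fst).Nodup → (t, v) ∈ l →
    ((l.map (fun p => if p.1 == t then (t, w) else p)).map (fun p => |3 - p.2|)).sum
      = (l.map (fun p => |3 - p.2|)).sum - |3 - v| + |3 - w|
  | [], t, v, w, _, hm => by simp at hm
  | (a, b) :: rest, t, v, w, hnd, hm => by
    simp only [List.map_cons, List.nodup_cons] at hnd
    by_cases hat : a = t
    · have hvb : v = b := by
        rcases List.mem_cons.mp hm with heq | hmem
        · cases heq; rfl
        · exact absurd (List.mem_map.mpr ⟨(t, v), hmem, rfl⟩) (hat ▸ hnd.1)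
      have hrest : rest.map (fun p => if p.1 == t then (t, w) else p) = rest := by
        rw [show rest.map (fun p => if p.1 == t then (t, w) else p) = rest.map id from
          List.map_congr_left (fun p hp => by
            have : p.1 ≠ t := fun hpt =>
              (hat ▸ hnd.1) (List.mem_map.mpr ⟨p, hp, hpt⟩)
            simp [this])]
        exact List.map_id rest
      have hc : ((a, b).1 == t) = true := by simp [hat]
      simp only [List.map_cons]
      rw [hc, if_pos rfl, hrest]
      have hhd : |3 - ((t, w) : Int × Int).2| = |3 - w| := rfl
      rw [hhd, hvb, List.sum_cons, List.sum_cons]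
      ring
    · have hmem : (t, v) ∈ rest := by
        rcases List.mem_cons.mp hm with heq | hmem
        · cases heq; exact absurd rfl hat
        · exact hmem
      have hc : ((a, b).1 == t) = false := beq_eq_false_iff_ne.mpr hat
      simp only [List.map_cons]
      rw [hc, if_neg (by simp)]
      have hhd : |3 - ((a, b) : Int × Int).2| = |3 - b| := rfl
      rw [hhd, List.sum_cons, List.sum_cons, sum_map_overwrite rest t v w hnd.2 hmem]
      ring

-- pvFindVal finds nothing iff the value does not occur among the dict's values
theorem pvFindVal_eq_none_iff (d : PySem.Dict Int Int) (hnd : d.keys.Nodup) (v : Int) :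
    pvFindVal d v = none ↔ d.values.contains v = false := by
  unfold pvFindVal
  rw [List.find?_eq_none, PySem.Dict.values_eq_map_keys d hnd 0]
  simp

-- a found key carries exactly the searched value
theorem pvFindVal_some (d : PySem.Dict Int Int) (v t : Int)
    (h : pvFindVal d v = some t) : (t, v) ∈ d.items := by
  unfold pvFindVal at h
  have hmem : t ∈ d.keys := List.mem_of_find?_eq_some h
  have hval : d.getD t 0 = v := by simpa using List.find?_some h
  rcases hq : d.get? t with _ | w
  · exact absurd hmem ((PySem.Dict.get?_eq_none_iff_not_mem_keys d t).mp hq)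
  · have hw : w = v := by
      rw [PySem.Dict.getD_eq_get?_getD, hq] at hval; simpa using hval
    exact hw ▸ PySem.Dict.mem_items_of_get?_eq_some d hq

theorem mem_values_of_mem_items (d : PySem.Dict Int Int) (t v : Int)
    (h : (t, v) ∈ d.items) : v ∈ d.values :=
  List.mem_map.mpr ⟨(t, v), h, rfl⟩

-- B's sum over values equals the items-level sum
theorem values_sum_eq_items_sum (d : PySem.Dict Int Int) :
    (d.values.map (fun c => |3 - c|)).sum = (d.items.map (fun p => |3 - p.2|)).sum := by
  simp only [PySem.Dict.values, List.map_map]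
  rfl

-- ===== VERDICT (by name: the statement is the Claim_ definition above) =====
theorem checkIsPongPongWin_spec : Claim_equal_checkIsPongPongWin := by
  intro hand ups king _
  unfold Spec_checkIsPongPongWin checkIsPongPongWin checkIsPongPongWin_alt
  rw [pvCheckMelds_eq_all]
  rcases hval : (ups.all (fun m =>
      (m.length == 3 || m.length == 4)
        && (PySem.List.pyGet? m 0 == PySem.List.pyGet? m (-1)))) with _ | _
  · simp
  · simp only [Bool.not_true, Bool.false_eq_true, if_false]
    rw [← getTile2NumDict_eq_counter]
    set d := getTile2NumDict hand with hd
    have hdc : d = PySem.Dict.counter hand := by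
      rw [hd, getTile2NumDict_eq_counter, PySem.Dict.foldl_insert_getD_add_one_eq_counter]
    have hnd : d.keys.Nodup := hdc ▸ PySem.Dict.nodup_keys_counter hand
    set S := ((d.values.map (fun c => |3 - c|)).sum) with hS
    -- case on the four searches
    rcases h2 : pvFindVal d 2 with _ | t2
    case _ => -- no pair of count 2
      have hc2 : d.values.contains 2 = false := (pvFindVal_eq_none_iff d hnd 2).mp h2
      rcases h1 : pvFindVal d 1 with _ | t1
      case _ =>
        have hc1 : d.values.contains 1 = false := (pvFindVal_eq_none_iff d hnd 1).mp h1
        rcases h4 : pvFindVal d 4 with _ | t4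
        case _ =>
          have hc4 : d.values.contains 4 = false := (pvFindVal_eq_none_iff d hnd 4).mp h4
          rcases h3 : pvFindVal d 3 with _ | t3
          case _ =>
            have hc3 : d.values.contains 3 = false := (pvFindVal_eq_none_iff d hnd 3).mp h3
            have hm2 : (2 : Int) ∉ d.values := by simpa using hc2
            have hm1 : (1 : Int) ∉ d.values := by simpa using hc1
            have hm4 : (4 : Int) ∉ d.values := by simpa using hc4
            have hm3 : (3 : Int) ∉ d.values := by simpa using hc3
            simp [pvFinish_false, hm2, hm1, hm4, hm3]
          case _ =>
            -- count-3 tile rewritten to 1: sum becomes S + 2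
            have hit : (t3, 3) ∈ d.items := pvFindVal_some d 3 t3 h3
            have hct : d.contains t3 = true :=
              (PySem.Dict.contains_iff_mem_keys d t3).mpr
                (List.mem_map.mpr ⟨(t3, (3 : Int)), hit, rfl⟩)
            have hc3 : d.values.contains 3 = true :=
              List.contains_iff_mem.mpr (mem_values_of_mem_items d t3 3 hit)
            have hsum : ((d.insert t3 1).values.map (fun c => |3 - c|)).sum = S + 2 := by
              rw [values_sum_eq_items_sum, PySem.Dict.items_insert_of_contains d 1 hct,
                sum_map_overwrite d.items t3 3 1 hnd hit, hS, values_sum_eq_items_sum]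
              norm_num
            simp only [pvFinish_true, hsum, hc2, hc1, hc4, hc3, Bool.false_or,
              Bool.false_eq_true, if_false, if_true]
        case _ =>
          -- a quad: delete it, one king spent
          have hit : (t4, 4) ∈ d.items := pvFindVal_some d 4 t4 h4
          have hc4 : d.values.contains 4 = true :=
            List.contains_iff_mem.mpr (mem_values_of_mem_items d t4 4 hit)
          have hsum : ((d.erase t4).values.map (fun c => |3 - c|)).sum = S - 1 := by
            rw [values_sum_eq_items_sum]
            show ((d.items.filter (fun p => !(p.1 == t4))).map (fun p => |3 - p.2|)).sum = S - 1
            rw [sum_filter_erase d.items t4 4 hnd hit, hS, values_sum_eq_items_sum]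
            norm_num
          simp only [pvFinish_true, hsum, hc2, hc1, hc4, Bool.false_or, Bool.false_eq_true,
            if_false, if_true]
          rw [decide_eq_decide]; omega
      case _ =>
        -- a single: delete it, one king spent
        have hit : (t1, 1) ∈ d.items := pvFindVal_some d 1 t1 h1
        have hc1 : d.values.contains 1 = true :=
          List.contains_iff_mem.mpr (mem_values_of_mem_items d t1 1 hit)
        have hsum : ((d.erase t1).values.map (fun c => |3 - c|)).sum = S - 2 := by
          rw [values_sum_eq_items_sum]
          show ((d.items.filter (fun p => !(p.1 == t1))).map (fun p => |3 - p.2|)).sum = S - 2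
          rw [sum_filter_erase d.items t1 1 hnd hit, hS, values_sum_eq_items_sum]
          norm_num
        simp only [pvFinish_true, hsum, hc2, hc1, Bool.or_true, if_true]
        rw [decide_eq_decide]; omega
    case _ =>
      -- a pair: delete it, no king spent
      have hit : (t2, 2) ∈ d.items := pvFindVal_some d 2 t2 h2
      have hc2 : d.values.contains 2 = true :=
        List.contains_iff_mem.mpr (mem_values_of_mem_items d t2 2 hit)
      have hsum : ((d.erase t2).values.map (fun c => |3 - c|)).sum = S - 1 := by
        rw [values_sum_eq_items_sum]
        show ((d.items.filter (fun p => !(p.1 == t2))).map (fun p => |3 - p.2|)).sum = S - 1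
        rw [sum_filter_erase d.items t2 2 hnd hit, hS, values_sum_eq_items_sum]
        norm_num
      simp only [pvFinish_true, hsum, hc2, Bool.true_or, if_true]
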